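-- pv_equiv track=rewrite | github.com/Remi-Mergen/AdventOfCode2023 | day01/part1.py | sum_by_line
-- ===== SOURCE A (Python) =====
-- def sum_by_line(line: str) -> str:
--     """
--     Extracts the first and last digits from a line of text
--     """
--     for char in line:
--         if char.isdigit():
--             first_digit = char
--             break
--     for char in line[::-1]:
--         if char.isdigit():
--             last_digit = char
--             break
--     return first_digit + last_digit
-- ===== SOURCE B (Python) =====
-- def sum_by_line(line: str) -> str:
--     digits = [c for c in line if c.isdigit()]
--     return digits[0] + digits[-1]
-- ===== Notes on version B (the rewrite author's own statement) =====
-- stated objective: simpler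
-- what changed: B replaces A's two scans (forward and over the reversed string) by a single filter collecting all digits once, then takes its first and last element.
import Mathlib
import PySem

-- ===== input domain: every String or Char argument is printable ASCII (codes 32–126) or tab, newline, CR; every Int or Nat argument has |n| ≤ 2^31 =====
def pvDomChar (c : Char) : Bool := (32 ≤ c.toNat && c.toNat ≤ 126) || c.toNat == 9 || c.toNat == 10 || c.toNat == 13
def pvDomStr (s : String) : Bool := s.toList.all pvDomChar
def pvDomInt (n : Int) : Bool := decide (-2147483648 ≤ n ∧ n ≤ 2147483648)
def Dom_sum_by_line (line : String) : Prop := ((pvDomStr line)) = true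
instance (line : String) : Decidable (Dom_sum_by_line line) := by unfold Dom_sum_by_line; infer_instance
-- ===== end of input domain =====

-- B collects the digits of the line in ONE filter pass and takes its first and last element,
-- instead of A's two scans (forward, and over the reversed string); objective: simpler.

-- ===== PORT A =====
-- the 'for char in …: if char.isdigit(): … break' loop, as structural recursion
def pvScanDigit : List Char → Option Char
  | [] => none
  | c :: rest => if PySem.Str.isdigit c then some c else pvScanDigit rest

def sum_by_line (line : String) : String :=
  let first_digit := pvScanDigit line.toList
  -- line[::-1]: step -1 is never 0, so slice? is always some
  let rev := (PySem.Str.slice? line none none (-1)).getD ""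
  let last_digit := pvScanDigit rev.toList
  match first_digit, last_digit with
  | some f, some l => String.ofList [f] ++ String.ofList [l]
  | _, _ => ""   -- Python raises UnboundLocalError here; excluded by Pre_

-- ===== PORT B =====
def sum_by_line_alt (line : String) : String :=
  let digits := line.toList.filter PySem.Str.isdigit
  -- digits[0] + digits[-1]; pyGet? = none is Python's IndexError, excluded by Pre_
  ((PySem.List.pyGet? digits 0).bind fun f =>
    (PySem.List.pyGet? digits (-1)).map fun l =>
      String.ofList [f] ++ String.ofList [l]).getD ""

-- ===== PRECONDITION & SPEC =====
-- Pre_ admits exactly the lines containing at least one digit; on the others A raises UnboundLocalError.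
def Pre_sum_by_line (line : String) : Prop := line.toList.any PySem.Str.isdigit = true
instance (line : String) : Decidable (Pre_sum_by_line line) := by unfold Pre_sum_by_line; infer_instance
def pvWitness_sum_by_line : String := "a1b2c"

def Spec_sum_by_line (line : String) (out : String) : Prop := out = sum_by_line_alt line
instance (line : String) (out : String) : Decidable (Spec_sum_by_line line out) := by unfold Spec_sum_by_line; infer_instance

-- ===== CLAIM (what is proved, stated in full; the proofs are below) =====
def Claim_equal_sum_by_line : Prop := ∀ (line : String), Dom_sum_by_line line → Pre_sum_by_line line → Spec_sum_by_line line (sum_by_line line)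

-- ===== LEMMAS AND PROOFS =====
-- A's break-loop returns the head of the digit filter
theorem pvScanDigit_eq_head (l : List Char) :
    pvScanDigit l = (l.filter PySem.Str.isdigit).head? := by
  induction l with
  | nil => rfl
  | cons c rest ih =>
      by_cases h : PySem.Str.isdigit c
      · simp [pvScanDigit, h]
      · simp [pvScanDigit, h, ih]

-- ===== VERDICT (by name: the statement is the Claim_ definition above) =====
theorem sum_by_line_spec : Claim_equal_sum_by_line := by
  intro line _ _
  show sum_by_line line = sum_by_line_alt line
  unfold sum_by_line sum_by_line_alt
  rw [PySem.Str.slice?_none_none_neg_one]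
  have h1 : pvScanDigit line.toList
      = PySem.List.pyGet? (line.toList.filter PySem.Str.isdigit) 0 := by
    rw [pvScanDigit_eq_head, PySem.List.pyGet?_zero, List.head?_eq_getElem?]
  have h2 : pvScanDigit line.toList.reverse
      = PySem.List.pyGet? (line.toList.filter PySem.Str.isdigit) (-1) := by
    rw [pvScanDigit_eq_head, List.filter_reverse, List.head?_reverse,
      PySem.List.pyGet?_neg_one]
  simp only [Option.getD_some, String.toList_ofList, h1, h2]
  cases PySem.List.pyGet? (line.toList.filter PySem.Str.isdigit) 0 <;>
    cases PySem.List.pyGet? (line.toList.filter PySem.Str.isdigit) (-1) <;> rfl
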